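-- pv_equiv track=rewrite | github.com/Jesoenn/NIDUC2 | utils/data_comparison.py | compare_bytes
-- ===== SOURCE A (Python) =====
-- def compare_bytes(noise_byte_list: list, byte_list: list):
--     rows = len(noise_byte_list)
--     information_length = len(noise_byte_list[0])
--     decoded_symbols = 0
--     not_decoded_symbols = 0
--     count_decoded_blocks = 0
--     count_failed_blocks = 0
--     for i in range(rows):
--         block_decoded = True
--         for j in range(information_length):
--             if noise_byte_list[i][j] != byte_list[i][j]:
--                 if block_decoded:
--                     block_decoded = False
--                     count_failed_blocks+=1
--                 not_decoded_symbols += 1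
--             else:
--                 decoded_symbols += 1
--         if block_decoded:
--             count_decoded_blocks += 1
--     return count_decoded_blocks, count_failed_blocks,decoded_symbols,not_decoded_symbols
-- ===== SOURCE B (Python) =====
-- def compare_bytes(noise_byte_list: list, byte_list: list):
--     rows = len(noise_byte_list)
--     information_length = len(noise_byte_list[0])
--     trimmed_noise = [r[:information_length] for r in noise_byte_list]
--     trimmed = [byte_list[i][:information_length] for i in range(rows)]
--     count_decoded_blocks = sum(a == b for a, b in zip(trimmed_noise, trimmed))
--     count_failed_blocks = rows - count_decoded_blocks
--     flat_noise = [x for r in trimmed_noise for x in r]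
--     flat = [x for r in trimmed for x in r]
--     not_decoded_symbols = sum(a != b for a, b in zip(flat_noise, flat))
--     decoded_symbols = rows * information_length - not_decoded_symbols
--     return count_decoded_blocks, count_failed_blocks, decoded_symbols, not_decoded_symbols
-- ===== Notes on version B (the rewrite author's own statement) =====
-- stated objective: alternative
-- what changed: Replaces A's nested index loops with per-element flag bookkeeping by staged whole-structure passes: blocks are classified by whole-row list equality of the trimmed rows, symbol mismatches are counted once over the flattened trimmed matrices, and the remaining two counters are derived by subtraction.
-- outside the precondition, e.g. on compare_bytes([[], []], []): A returns (2, 0, 0, 0), B raises IndexError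
import Mathlib
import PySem

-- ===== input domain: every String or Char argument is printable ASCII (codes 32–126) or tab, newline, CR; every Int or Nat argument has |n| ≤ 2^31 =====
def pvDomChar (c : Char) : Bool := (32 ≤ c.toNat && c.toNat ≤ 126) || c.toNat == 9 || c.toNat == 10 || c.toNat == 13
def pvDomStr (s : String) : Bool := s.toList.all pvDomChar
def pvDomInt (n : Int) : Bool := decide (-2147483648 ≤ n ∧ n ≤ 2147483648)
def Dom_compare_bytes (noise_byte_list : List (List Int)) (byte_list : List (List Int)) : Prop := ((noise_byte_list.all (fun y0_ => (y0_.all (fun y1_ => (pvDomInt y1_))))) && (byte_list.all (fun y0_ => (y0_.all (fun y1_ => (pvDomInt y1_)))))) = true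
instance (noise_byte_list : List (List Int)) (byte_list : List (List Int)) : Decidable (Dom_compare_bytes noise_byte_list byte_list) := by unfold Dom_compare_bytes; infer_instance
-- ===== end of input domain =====

-- B replaces A's nested index loops with per-element flag bookkeeping by staged passes: blocks
-- classified by whole-row equality of trimmed rows, symbol mismatches counted once over the
-- flattened trimmed matrices, remaining counters derived by subtraction (alternative).


-- ===== PORT A =====
-- literal port of A: outer state (count_decoded_blocks, count_failed_blocks, decoded_symbols,
-- not_decoded_symbols), inner state (block_decoded, count_failed_blocks, not_decoded_symbols,
-- decoded_symbols); list indexing via pyGetD (in range under Pre_).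
def compare_bytes (noise_byte_list : List (List Int)) (byte_list : List (List Int)) : Int × Int × Int × Int :=
  let rows : Int := PySem.List.len noise_byte_list
  let information_length : Int := PySem.List.len (PySem.List.pyGetD noise_byte_list 0 [])
  (PySem.List.pyRange 0 rows 1).foldl
    (fun (s : Int × Int × Int × Int) i =>
      let t :=
        (PySem.List.pyRange 0 information_length 1).foldl
          (fun (t : Bool × Int × Int × Int) j =>
            if PySem.List.pyGetD (PySem.List.pyGetD noise_byte_list i []) j 0
                ≠ PySem.List.pyGetD (PySem.List.pyGetD byte_list i []) j 0 then
              if t.1 then (false, t.2.1 + 1, t.2.2.1 + 1, t.2.2.2)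
              else (t.1, t.2.1, t.2.2.1 + 1, t.2.2.2)
            else (t.1, t.2.1, t.2.2.1, t.2.2.2 + 1))
          (true, s.2.1, s.2.2.2, s.2.2.1)
      (if t.1 then s.1 + 1 else s.1, t.2.1, t.2.2.2, t.2.2.1))
    (0, 0, 0, 0)

-- ===== PORT B =====
-- literal port of Source B: trim rows by slicing, classify blocks by whole-row equality of the
-- trimmed rows, count mismatching symbols once over the flattened trimmed matrices, derive
-- the failed-block and decoded-symbol counts by subtraction.
def compare_bytes_alt (noise_byte_list : List (List Int)) (byte_list : List (List Int)) : Int × Int × Int × Int :=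
  let rows : Int := PySem.List.len noise_byte_list
  let information_length : Int := PySem.List.len (PySem.List.pyGetD noise_byte_list 0 [])
  let trimmed_noise := noise_byte_list.map (fun r => PySem.List.slice r none (some information_length))
  let trimmed := (PySem.List.pyRange 0 rows 1).map
    (fun i => PySem.List.slice (PySem.List.pyGetD byte_list i []) none (some information_length))
  let count_decoded_blocks : Int := ((trimmed_noise.zip trimmed).countP (fun q => q.1 == q.2) : Nat)
  let count_failed_blocks : Int := rows - count_decoded_blocks
  let not_decoded_symbols : Int :=
    ((trimmed_noise.flatten.zip trimmed.flatten).countP (fun q => decide (q.1 ≠ q.2)) : Nat)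
  let decoded_symbols : Int := rows * information_length - not_decoded_symbols
  (count_decoded_blocks, count_failed_blocks, decoded_symbols, not_decoded_symbols)

-- ===== PRECONDITION & SPEC =====
-- Pre_ excludes (a) exactly the inputs where A raises IndexError (empty noise_byte_list, or an
-- addressed row shorter than the first noise row), and (b) inputs with byte_list shorter than
-- noise_byte_list and first noise row empty, where A still returns (it never touches byte_list)
-- but B's own indexing byte_list[i] naturally raises IndexError.
def Pre_compare_bytes (noise_byte_list : List (List Int)) (byte_list : List (List Int)) : Prop :=
  noise_byte_list ≠ [] ∧ noise_byte_list.length ≤ byte_list.length ∧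
  (∀ r ∈ noise_byte_list, (noise_byte_list.headD []).length ≤ r.length) ∧
  (∀ r ∈ byte_list.take noise_byte_list.length, (noise_byte_list.headD []).length ≤ r.length)
instance (noise_byte_list : List (List Int)) (byte_list : List (List Int)) : Decidable (Pre_compare_bytes noise_byte_list byte_list) := by unfold Pre_compare_bytes; infer_instance

def pvWitness_compare_bytes : List (List Int) × List (List Int) := ([[1, 2], [0, 2]], [[1, 2], [1, 2]])

def Spec_compare_bytes (noise_byte_list : List (List Int)) (byte_list : List (List Int)) (out : Int × Int × Int × Int) : Prop := out = compare_bytes_alt noise_byte_list byte_list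
instance (noise_byte_list : List (List Int)) (byte_list : List (List Int)) (out : Int × Int × Int × Int) : Decidable (Spec_compare_bytes noise_byte_list byte_list out) := by unfold Spec_compare_bytes; infer_instance

-- ===== CLAIM (what is proved, stated in full; the proofs are below) =====
def Claim_equal_compare_bytes : Prop := ∀ (noise_byte_list : List (List Int)) (byte_list : List (List Int)), Dom_compare_bytes noise_byte_list byte_list → Pre_compare_bytes noise_byte_list byte_list → Spec_compare_bytes noise_byte_list byte_list (compare_bytes noise_byte_list byte_list)

-- ===== LEMMAS AND PROOFS =====

-- interpreting a two-list index loop 'for j in range(n): … x[j] … y[j] …' as a fold over the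
-- zip of the truncated lists
theorem pv_foldl_pyRange_two {α β σ : Type} (x : List α) (y : List β) (dx : α) (dy : β)
    (n : Nat) (hx : n ≤ x.length) (hy : n ≤ y.length) (g : σ → α → β → σ) (init : σ) :
    (PySem.List.pyRange 0 (n : Int) 1).foldl
        (fun s j => g s (PySem.List.pyGetD x j dx) (PySem.List.pyGetD y j dy)) init
      = ((x.take n).zip (y.take n)).foldl (fun s q => g s q.1 q.2) init := by
  have hz : ((x.take n).zip (y.take n)).length = n := by
    simp [List.length_zip]; omega
  have h1 : (PySem.List.pyRange 0 (n : Int) 1).foldl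
        (fun s j => g s (PySem.List.pyGetD x j dx) (PySem.List.pyGetD y j dy)) init
      = (PySem.List.pyRange 0 (n : Int) 1).foldl
        (fun s j => (fun (s : σ) (q : α × β) => g s q.1 q.2) s
          (PySem.List.pyGetD ((x.take n).zip (y.take n)) j (dx, dy))) init := by
    apply PySem.List.foldl_congr_mem
    intro acc j hj
    rw [PySem.List.mem_pyRange_one] at hj
    have h0 : 0 ≤ j := hj.1
    have hjn : j.toNat < n := by omega
    rw [PySem.List.pyGetD_eq_getElem x dx h0 (by omega),
        PySem.List.pyGetD_eq_getElem y dy h0 (by omega),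
        PySem.List.pyGetD_eq_getElem ((x.take n).zip (y.take n)) (dx, dy) h0 (by rw [hz]; omega)]
    simp [List.getElem_zip, List.getElem_take]
  rw [h1]
  have h2 := PySem.List.foldl_pyRange_zero_pyGetD' ((x.take n).zip (y.take n)) (dx, dy)
      (fun (s : σ) (q : α × β) => g s q.1 q.2) init
  rw [hz] at h2
  exact h2

-- closed form of A's inner loop as a structural fold over the zipped row
theorem pv_inner_fold (z : List (Int × Int)) : ∀ (bd : Bool) (cfb ndec dec : Int),
    z.foldl
        (fun (t : Bool × Int × Int × Int) q =>
          if q.1 ≠ q.2 then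
            if t.1 then (false, t.2.1 + 1, t.2.2.1 + 1, t.2.2.2)
            else (t.1, t.2.1, t.2.2.1 + 1, t.2.2.2)
          else (t.1, t.2.1, t.2.2.1, t.2.2.2 + 1)) (bd, cfb, ndec, dec)
      = (bd && (z.countP (fun q => decide (q.1 ≠ q.2)) == 0),
         cfb + (if bd = true ∧ z.countP (fun q => decide (q.1 ≠ q.2)) ≠ 0 then 1 else 0),
         ndec + (z.countP (fun q => decide (q.1 ≠ q.2)) : Nat),
         dec + (z.countP (fun q => decide (q.1 = q.2)) : Nat)) := by
  induction z with
  | nil => intro bd cfb ndec dec; simp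
  | cons q z ih =>
    intro bd cfb ndec dec
    by_cases h : q.1 = q.2
    · simp only [List.foldl_cons, List.countP_cons, h, ne_eq, not_true_eq_false, decide_false,
        if_false, decide_true]
      rw [if_neg (by simp)]
      rw [ih]
      refine Prod.ext rfl (Prod.ext rfl (Prod.ext rfl ?_))
      simp
      ring
    · simp only [List.foldl_cons, List.countP_cons, ne_eq, h, not_false_eq_true, decide_true]
      rw [if_pos (by simp)]
      cases bd
      · simp only [Bool.false_eq_true, if_false]
        rw [ih]
        refine Prod.ext ?_ (Prod.ext ?_ (Prod.ext ?_ ?_))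
        · simp
        · simp
        · simp; ring
        · simp
      · simp only [if_true]
        rw [ih]
        refine Prod.ext ?_ (Prod.ext ?_ (Prod.ext ?_ ?_))
        · simp
        · simp
        · simp; ring
        · simp

-- the per-row step of A's port, abstracted over the two rows (proof-only helper)
def pvRowA (L : Int) (s : Int × Int × Int × Int) (x y : List Int) : Int × Int × Int × Int :=
  let t :=
    (PySem.List.pyRange 0 L 1).foldl
      (fun (t : Bool × Int × Int × Int) j =>
        if PySem.List.pyGetD x j 0 ≠ PySem.List.pyGetD y j 0 then
          if t.1 then (false, t.2.1 + 1, t.2.2.1 + 1, t.2.2.2)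
          else (t.1, t.2.1, t.2.2.1 + 1, t.2.2.2)
        else (t.1, t.2.1, t.2.2.1, t.2.2.2 + 1))
      (true, s.2.1, s.2.2.2, s.2.2.1)
  (if t.1 then s.1 + 1 else s.1, t.2.1, t.2.2.2, t.2.2.1)

-- mismatch count of one row pair after trimming to the first L symbols (proof-only helper)
def pvM (L : Int) (p : List Int × List Int) : Nat :=
  ((PySem.List.slice p.1 none (some L)).zip (PySem.List.slice p.2 none (some L))).countP
    (fun q => decide (q.1 ≠ q.2))

-- the per-row step A reduces to (proof-only helper; the four counters as functions of pvM)
def pvRow (L : Int) (s : Int × Int × Int × Int) (p : List Int × List Int) : Int × Int × Int × Int :=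
  (if pvM L p = 0 then s.1 + 1 else s.1,
   if pvM L p = 0 then s.2.1 else s.2.1 + 1,
   s.2.2.1 + (L - (pvM L p : Int)),
   s.2.2.2 + (pvM L p : Int))

theorem pv_countP_not {α : Type} (p : α → Bool) (l : List α) :
    l.countP p + l.countP (fun a => !p a) = l.length := by
  induction l with
  | nil => simp
  | cons a l ih => by_cases h : p a = true <;> simp [h] <;> omega

theorem pv_countP_split (z : List (Int × Int)) :
    z.countP (fun q => decide (q.1 ≠ q.2)) + z.countP (fun q => decide (q.1 = q.2)) = z.length := by
  have h := List.length_eq_countP_add_countP (p := fun q : Int × Int => decide (q.1 ≠ q.2)) (l := z)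
  simp only [ne_eq, decide_not, Bool.decide_eq_true, Bool.not_not] at h ⊢
  omega

-- on rows long enough, A's row step equals the pvM-based row step
theorem pv_row_eq (L : Nat) (x y : List Int) (hx : L ≤ x.length) (hy : L ≤ y.length)
    (s : Int × Int × Int × Int) : pvRowA (L : Int) s x y = pvRow (L : Int) s (x, y) := by
  have hin := pv_foldl_pyRange_two x y 0 0 L hx hy
    (fun (t : Bool × Int × Int × Int) (a b : Int) =>
      if a ≠ b then
        if t.1 then (false, t.2.1 + 1, t.2.2.1 + 1, t.2.2.2)
        else (t.1, t.2.1, t.2.2.1 + 1, t.2.2.2)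
      else (t.1, t.2.1, t.2.2.1, t.2.2.2 + 1))
    (true, s.2.1, s.2.2.2, s.2.2.1)
  unfold pvRowA pvRow pvM
  rw [hin, pv_inner_fold]
  rw [PySem.List.slice_to_natCast, PySem.List.slice_to_natCast]
  have hsplit := pv_countP_split ((x.take L).zip (y.take L))
  have hlen : ((x.take L).zip (y.take L)).length = L := by simp [List.length_zip]; omega
  set m := ((x.take L).zip (y.take L)).countP (fun q => decide (q.1 ≠ q.2)) with hm
  set e := ((x.take L).zip (y.take L)).countP (fun q => decide (q.1 = q.2)) with he
  by_cases h0 : m = 0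
  · simp only [h0]
    refine Prod.ext ?_ (Prod.ext ?_ (Prod.ext ?_ ?_))
    · simp
    · simp
    · simp only []
      have : e = L := by omega
      simp [this]
    · simp
  · refine Prod.ext ?_ (Prod.ext ?_ (Prod.ext ?_ ?_))
    · simp [h0]
    · simp [h0]
    · simp only []
      have : (e : Int) = (L : Int) - (m : Int) := by omega
      simp [this]
    · simp

-- closed form of the pvRow fold: the four counters in terms of countP and the mismatch sum
theorem pv_fold_closed (L : Int) (z : List (List Int × List Int)) : ∀ (c f d nd : Int),
    z.foldl (pvRow L) (c, f, d, nd)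
      = (c + (z.countP (fun p => pvM L p == 0) : Nat),
         f + (z.countP (fun p => !(pvM L p == 0)) : Nat),
         d + ((z.length : Int) * L - ((z.map (pvM L)).sum : Nat)),
         nd + ((z.map (pvM L)).sum : Nat)) := by
  induction z with
  | nil => intro c f d nd; simp
  | cons p z ih =>
    intro c f d nd
    rw [List.foldl_cons]
    show z.foldl (pvRow L) (pvRow L (c, f, d, nd) p) = _
    rw [show pvRow L (c, f, d, nd) p =
        (if pvM L p = 0 then c + 1 else c, if pvM L p = 0 then f else f + 1,
         d + (L - (pvM L p : Int)), nd + (pvM L p : Int)) from rfl]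
    rw [ih]
    simp only [List.countP_cons, List.map_cons, List.sum_cons, List.length_cons]
    by_cases h0 : pvM L p = 0
    · refine Prod.ext ?_ (Prod.ext ?_ (Prod.ext ?_ ?_)) <;>
        first
          | (simp [h0]; push_cast; ring)
          | simp [h0]
          | (push_cast; ring)
    · refine Prod.ext ?_ (Prod.ext ?_ (Prod.ext ?_ ?_)) <;>
        first
          | (simp [h0]; push_cast; ring)
          | simp [h0]
          | (push_cast; ring)

-- trimmed byte rows via range-indexing = map over the taken prefix
theorem pv_range_map (bl : List (List Int)) (n : Nat) (hn : n ≤ bl.length) (L : Int) :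
    (PySem.List.pyRange 0 (n : Int) 1).map
        (fun i => PySem.List.slice (PySem.List.pyGetD bl i []) none (some L))
      = (bl.take n).map (fun r => PySem.List.slice r none (some L)) := by
  apply List.ext_getElem
  · rw [List.length_map, List.length_map, PySem.List.length_pyRange_one, List.length_take]
    omega
  · intro k hk1 hk2
    have hkn : k < n := by
      rw [List.length_map, PySem.List.length_pyRange_one] at hk1
      omega
    simp only [List.getElem_map, PySem.List.getElem_pyRange_one, zero_add]
    rw [PySem.List.pyGetD_eq_getElem bl [] (Int.natCast_nonneg k) (by simp; omega)]
    simp [List.getElem_take]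

-- two equal-length lists are equal iff their zip has no mismatching pair
theorem pv_beq_iff_count0 (x : List Int) : ∀ (y : List Int), x.length = y.length →
    ((x == y) = ((x.zip y).countP (fun q => decide (q.1 ≠ q.2)) == 0)) := by
  induction x with
  | nil => intro y hy; cases y with
    | nil => rfl
    | cons b ys => simp at hy
  | cons a xs ih =>
    intro y hy
    cases y with
    | nil => simp at hy
    | cons b ys =>
      have hlen : xs.length = ys.length := by simpa using hy
      by_cases hab : a = b
      · subst hab
        have hxy := ih ys hlen
        simp [List.cons_beq_cons, List.countP_cons, hxy]
      · simp [List.cons_beq_cons, hab, List.countP_cons]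

-- zipping flattens = flattening the pairwise zips, when paired rows have equal lengths
theorem pv_flatten_zip (xs : List (List Int)) : ∀ (ys : List (List Int)),
    (∀ p ∈ xs.zip ys, p.1.length = p.2.length) →
    xs.flatten.zip ys.flatten = ((xs.zip ys).map (fun p => p.1.zip p.2)).flatten := by
  induction xs with
  | nil => intro ys h; simp
  | cons x xs ih =>
    intro ys h
    cases ys with
    | nil => simp
    | cons y ys =>
      have hxy : x.length = y.length := h (x, y) (by simp)
      simp only [List.flatten_cons, List.zip_cons_cons, List.map_cons]
      rw [List.zip_append (by omega), ih ys (fun p hp => h p (by simp [hp]))]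

-- ===== VERDICT (by name: the statement is the Claim_ definition above) =====
theorem compare_bytes_spec : Claim_equal_compare_bytes := by
  intro nbl bl _ hp
  obtain ⟨hne, hlen, hn, hb⟩ := hp
  cases nbl with
  | nil => exact absurd rfl hne
  | cons h0 rest =>
    unfold Spec_compare_bytes compare_bytes compare_bytes_alt
    simp only [PySem.List.pyGetD_zero_cons, PySem.List.len_eq]
    set n := (h0 :: rest).length with hn_def
    set L := h0.length with hL_def
    set sl := fun r : List Int => PySem.List.slice r none (some (L : Int)) with hsl_def
    set pne := fun q : Int × Int => decide (q.1 ≠ q.2) with hpne_def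
    set z := (h0 :: rest).zip (bl.take n) with hz_def
    have hzlen : z.length = n := by
      rw [hz_def, List.length_zip, List.length_take]
      omega
    -- A's side: fold of pvRowA over indices = closed form over z
    have hA : (PySem.List.pyRange 0 (n : Int) 1).foldl
        (fun s j => pvRowA (L : Int) s (PySem.List.pyGetD (h0 :: rest) j [])
          (PySem.List.pyGetD bl j [])) (0, 0, 0, 0)
      = z.foldl (pvRow (L : Int)) (0, 0, 0, 0) := by
      refine Eq.trans (pv_foldl_pyRange_two (h0 :: rest) bl [] [] n le_rfl hlen
        (fun s a b => pvRowA (L : Int) s a b) (0, 0, 0, 0)) ?_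
      rw [List.take_length]
      apply PySem.List.foldl_congr_mem
      intro acc q hq
      exact pv_row_eq L q.1 q.2 (hn q.1 (List.of_mem_zip hq).1)
        (hb q.2 (List.of_mem_zip hq).2) acc
    -- B's side quantities
    have hzip : ((h0 :: rest).map sl).zip ((bl.take n).map sl) = z.map (Prod.map sl sl) := by
      rw [List.zip_map]
    have hC : (z.map (Prod.map sl sl)).countP (fun q => q.1 == q.2)
        = z.countP (fun p => pvM (L : Int) p == 0) := by
      rw [List.countP_map]
      apply List.countP_congr
      intro p hp
      have h1 : L ≤ p.1.length := hn p.1 (List.of_mem_zip hp).1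
      have h2 : L ≤ p.2.length := hb p.2 (List.of_mem_zip hp).2
      have hkey : (sl p.1 == sl p.2) = (pvM (L : Int) p == 0) := by
        unfold pvM
        simp only [hsl_def, PySem.List.slice_to_natCast]
        exact pv_beq_iff_count0 (p.1.take L) (p.2.take L) (by simp; omega)
      simp only [Function.comp_apply, Prod.map_fst, Prod.map_snd]
      rw [hkey]
    have hlenrow : ∀ p ∈ ((h0 :: rest).map sl).zip ((bl.take n).map sl),
        p.1.length = p.2.length := by
      rw [hzip]
      intro p hp
      obtain ⟨q, hq, rfl⟩ := List.mem_map.mp hp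
      have h1 : L ≤ q.1.length := hn q.1 (List.of_mem_zip hq).1
      have h2 : L ≤ q.2.length := hb q.2 (List.of_mem_zip hq).2
      simp [Prod.map, hsl_def, PySem.List.slice_to_natCast]
      omega
    have hM : (((h0 :: rest).map sl).flatten.zip ((bl.take n).map sl).flatten).countP pne
        = (z.map (pvM (L : Int))).sum := by
      rw [pv_flatten_zip _ _ hlenrow, List.countP_flatten, hzip]
      simp only [List.map_map]
      rfl
    rw [pv_range_map bl n hlen (L : Int)]
    show (PySem.List.pyRange 0 (n : Int) 1).foldl
        (fun s j => pvRowA (L : Int) s (PySem.List.pyGetD (h0 :: rest) j [])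
          (PySem.List.pyGetD bl j [])) (0, 0, 0, 0)
      = ((((((h0 :: rest).map sl).zip ((bl.take n).map sl)).countP (fun q => q.1 == q.2) : Nat) : Int),
         (n : Int) - ((((h0 :: rest).map sl).zip ((bl.take n).map sl)).countP (fun q => q.1 == q.2) : Nat),
         (n : Int) * (L : Int) - ((((h0 :: rest).map sl).flatten.zip ((bl.take n).map sl).flatten).countP pne : Nat),
         (((((h0 :: rest).map sl).flatten.zip ((bl.take n).map sl).flatten).countP pne : Nat) : Int))
    rw [hA, pv_fold_closed, hzip, hC, hM]
    have hcount : z.countP (fun p => pvM (L : Int) p == 0)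
        + z.countP (fun p => !(pvM (L : Int) p == 0)) = n := by
      rw [← hzlen]
      exact pv_countP_not _ z
    refine Prod.ext ?_ (Prod.ext ?_ (Prod.ext ?_ ?_))
    · simp
    · simp only []
      push_cast
      omega
    · rw [hzlen]
      push_cast
      ring
    · simp
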